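-- pv_equiv track=rewrite | github.com/Tsuchinotama/Codage | DossierCodageEquationsDiophantiennes.py | compte_lettres
-- ===== SOURCE A (Python) =====
-- from operator import itemgetter
--
-- def compte_lettres(message_code):
--     L=list(message_code)
--     freq=dict()
--     for i in range(97,123):
--         freq[chr(i)] = 0
--     for lettre in L:
--         freq[lettre] = freq[lettre]+1
--     Lt=sorted(freq.items(), key=itemgetter(1), reverse=True)
--     Llt=[[Lt[0]]]
--     i=1
--     j=0
--     while i<26:
--         if Lt[i][1]==Lt[i-1][1]:
--             Llt[j].append(Lt[i])
--         else:
--             Llt.append([Lt[i]])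
--             j=j+1
--         i=i+1
--     return Llt
-- ===== SOURCE B (Python) =====
-- def compte_lettres(message_code):
--     freq = dict()
--     for i in range(97, 123):
--         freq[chr(i)] = 0
--     for lettre in message_code:
--         freq[lettre] = freq[lettre] + 1
--     # bucket the (letter, count) pairs by count, in a-z order
--     buckets = dict()
--     for lettre, n in freq.items():
--         if n in buckets:
--             buckets[n].append((lettre, n))
--         else:
--             buckets[n] = [(lettre, n)]
--     counts = sorted(buckets.keys(), reverse=True)
--     return [buckets[c] for c in counts]
-- ===== Notes on version B (the rewrite author's own statement) =====
-- stated objective: alternative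
-- what changed: A sorts all 26 (letter,count) pairs by count descending and then scans the sorted list index-by-index to split it into groups of adjacent equal counts; B never groups by adjacency: it builds a dict bucketing the (letter,count) pairs by their count (in a-z order, so each bucket stays alphabetical) and emits the buckets keyed by the distinct counts sorted descending.
import Mathlib
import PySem

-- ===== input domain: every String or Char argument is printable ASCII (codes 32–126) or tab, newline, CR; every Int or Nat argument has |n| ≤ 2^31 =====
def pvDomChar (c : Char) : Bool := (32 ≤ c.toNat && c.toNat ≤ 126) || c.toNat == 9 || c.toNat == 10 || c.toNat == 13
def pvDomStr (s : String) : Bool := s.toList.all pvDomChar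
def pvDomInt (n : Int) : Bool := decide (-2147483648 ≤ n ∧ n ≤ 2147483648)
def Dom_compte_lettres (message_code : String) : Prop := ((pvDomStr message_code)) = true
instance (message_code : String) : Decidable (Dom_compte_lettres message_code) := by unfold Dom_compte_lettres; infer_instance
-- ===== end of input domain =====

-- B replaces A's sort-all-26-then-scan-adjacent grouping by a frequency-keyed bucket table
-- traversed in descending count order (objective: alternative; same exact return value).

-- ===== PORT A =====
-- chr(i) for the loop range 97..122 (exact there)
def pvChrA (i : Int) : String := String.singleton (Char.ofNat i.toNat)

-- the dict after 'for i in range(97,123): freq[chr(i)] = 0'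
def pvInitA : PySem.Dict String Int :=
  (PySem.List.pyRange 97 123 1).foldl (fun d i => d.insert (pvChrA i) 0) PySem.Dict.empty

-- 'for lettre in L: freq[lettre] = freq[lettre]+1'; the default 0 of modify is never used
-- under Pre_ (every key is present); outside Pre_ the Python raises KeyError.
def pvFreqA (message_code : String) : PySem.Dict String Int :=
  (message_code.toList.map (fun c => String.singleton c)).foldl
    (fun d lettre => d.modify lettre 0 (· + 1)) pvInitA

-- the 'while i<26' grouping loop over Lt; Lt[i] is pyGetD (always in range: Lt has 26 entries)
def pvGroupLoopA (Lt : List (String × Int)) : List (List (String × Int)) :=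
  ((PySem.List.pyRange 1 26 1).foldl
    (fun (st : List (List (String × Int)) × Nat) i =>
      if (PySem.List.pyGetD Lt i ("", 0)).2 = (PySem.List.pyGetD Lt (i - 1) ("", 0)).2 then
        (st.1.modify st.2 (· ++ [PySem.List.pyGetD Lt i ("", 0)]), st.2)
      else
        (st.1 ++ [[PySem.List.pyGetD Lt i ("", 0)]], st.2 + 1))
    ([[PySem.List.pyGetD Lt 0 ("", 0)]], 0)).1

def compte_lettres (message_code : String) : List (List (String × Int)) :=
  pvGroupLoopA (PySem.List.sorted (pvFreqA message_code).items (fun p => p.2) true)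

-- ===== PORT B =====
def pvChrB (i : Int) : String := String.singleton (Char.ofNat i.toNat)

def pvInitB : PySem.Dict String Int :=
  (PySem.List.pyRange 97 123 1).foldl (fun d i => d.insert (pvChrB i) 0) PySem.Dict.empty

-- same counting phase as A (Source B keeps it verbatim)
def pvFreqB (message_code : String) : PySem.Dict String Int :=
  (message_code.toList.map (fun c => String.singleton c)).foldl
    (fun d lettre => d.modify lettre 0 (· + 1)) pvInitB

-- 'if n in buckets: buckets[n].append(p) else: buckets[n] = [p]' is exactly Dict.modify n [] (· ++ [p])
def pvBucketsB (ps : List (String × Int)) : PySem.Dict Int (List (String × Int)) :=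
  ps.foldl (fun b p => b.modify p.2 [] (· ++ [p])) PySem.Dict.empty

def compte_lettres_alt (message_code : String) : List (List (String × Int)) :=
  let buckets := pvBucketsB (pvFreqB message_code).items
  (PySem.List.sorted buckets.keys (fun c => c) true).map (fun c => buckets.getD c [])

-- ===== PRECONDITION & SPEC =====
-- Pre_: every character is a lowercase ASCII letter; on any other character the Python A
-- (and B alike) raises KeyError while counting, so no value is returned there.
def Pre_compte_lettres (message_code : String) : Prop :=
  (message_code.toList.all (fun c => 97 ≤ c.toNat && c.toNat ≤ 122)) = true
instance (message_code : String) : Decidable (Pre_compte_lettres message_code) := by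
  unfold Pre_compte_lettres; infer_instance

def pvWitness_compte_lettres : String := "bonjour"

def Spec_compte_lettres (message_code : String) (out : List (List (String × Int))) : Prop :=
  out = compte_lettres_alt message_code
instance (message_code : String) (out : List (List (String × Int))) : Decidable (Spec_compte_lettres message_code out) := by
  unfold Spec_compte_lettres; infer_instance

-- ===== CLAIM (what is proved, stated in full; the proofs are below) =====
def Claim_equal_compte_lettres : Prop := ∀ (message_code : String), Dom_compte_lettres message_code → Pre_compte_lettres message_code → Spec_compte_lettres message_code (compte_lettres message_code)

-- ===== LEMMAS AND PROOFS =====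

-- ---- proof-side abbreviations ----
def pvF (st : List (List (String × Int)) × Nat) (prev cur : String × Int) :
    List (List (String × Int)) × Nat :=
  if cur.2 = prev.2 then (st.1.modify st.2 (· ++ [cur]), st.2)
  else (st.1 ++ [[cur]], st.2 + 1)

def pvRunF (zs : List ((String × Int) × (String × Int))) (st : List (List (String × Int)) × Nat) :
    List (List (String × Int)) × Nat :=
  zs.foldl (fun st q => pvF st q.1 q.2) st

def pvBF (a b : String × Int) : Bool := decide (b.2 < a.2)

def pvD (ps : List (String × Int)) : List Int :=
  PySem.List.sorted (PySem.Set.ofList (ps.map (fun p => p.2))) (fun c => c) true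

def pvFil (ps : List (String × Int)) (c : Int) : List (String × Int) :=
  ps.filter (fun p => p.2 == c)

theorem pvRunF_cons (q : (String × Int) × (String × Int)) (zs : List ((String × Int) × (String × Int)))
    (st : List (List (String × Int)) × Nat) :
    pvRunF (q :: zs) st = pvRunF zs (pvF st q.1 q.2) := rfl

theorem pv_freqAB (msg : String) : pvFreqA msg = pvFreqB msg := rfl

-- ---- the index loop of A as a fold over adjacent pairs ----
theorem pv_modify_last {α : Type} (acc : List α) (g : α) (f : α → α) :
    (acc ++ [g]).modify acc.length f = acc ++ [f g] := by
  induction acc with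
  | nil => simp
  | cons a t ih => simpa using ih

theorem pv_bridge_aux {σ : Type} (g : σ → (String × Int) → (String × Int) → σ)
    (d : String × Int) :
    ∀ (rest : List (String × Int)) (a : String × Int) (init : σ),
    (List.range rest.length).foldl
      (fun st k => g st ((a :: rest).getD k d) ((a :: rest).getD (k + 1) d)) init
    = ((a :: rest).zip rest).foldl (fun st q => g st q.1 q.2) init := by
  intro rest
  induction rest with
  | nil => intro a init; simp
  | cons b t ih =>
    intro a init
    rw [List.length_cons, List.range_succ_eq_map, List.foldl_cons, List.foldl_map]
    conv_rhs => rw [show (a :: b :: t).zip (b :: t) = (a, b) :: (b :: t).zip t from rfl,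
      List.foldl_cons]
    rw [← ih b]
    simp only [List.getD_cons_succ, List.getD_cons_zero]

theorem pv_loop_eq_pairs (Lt : List (String × Int)) (h : Lt.length = 26)
    {σ : Type} (g : σ → (String × Int) → (String × Int) → σ) (init : σ) :
    (PySem.List.pyRange 1 26 1).foldl
      (fun st i => g st (PySem.List.pyGetD Lt (i - 1) ("", 0)) (PySem.List.pyGetD Lt i ("", 0))) init
    = (Lt.zip Lt.tail).foldl (fun st q => g st q.1 q.2) init := by
  obtain ⟨a, rest, rfl⟩ : ∃ a rest, Lt = a :: rest := by
    cases Lt with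
    | nil => simp at h
    | cons a r => exact ⟨a, r, rfl⟩
  have hr : rest.length = 25 := by simpa using h
  have h1 : PySem.List.pyRange 1 26 1 = (List.range 25).map (fun k : Nat => (1 : Int) + (k : Int)) := by
    rw [PySem.List.pyRange_one]
    congr 1
  rw [h1, List.foldl_map]
  have hbody : ∀ (st : σ) (k : Nat), k ∈ List.range 25 →
      g st (PySem.List.pyGetD (a :: rest) ((1 : Int) + k - 1) ("", 0))
           (PySem.List.pyGetD (a :: rest) ((1 : Int) + k) ("", 0))
      = g st ((a :: rest).getD k ("", 0)) ((a :: rest).getD (k + 1) ("", 0)) := by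
    intro st k _
    have e1 : (1 : Int) + k - 1 = (k : Int) := by ring
    have e2 : (1 : Int) + k = ((k + 1 : Nat) : Int) := by push_cast; ring
    rw [e1, e2, PySem.List.pyGetD_natCast, PySem.List.pyGetD_natCast]
  rw [PySem.List.foldl_congr_mem _ _ _ init hbody, ← hr, pv_bridge_aux]
  rfl

-- ---- the pair fold groups a concatenation of constant-count blocks into those blocks ----
theorem pv_inner (c : Int) :
    ∀ (ws : List (String × Int)), (∀ p ∈ ws, p.2 = c) →
    ∀ (w : String × Int), w.2 = c →
    ∀ (rest : List (String × Int)) (acc : List (List (String × Int))) (g : List (String × Int)),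
    pvRunF ((w :: (ws ++ rest)).zip (ws ++ rest)) (acc ++ [g], acc.length)
    = pvRunF ((ws.getLastD w :: rest).zip rest) (acc ++ [g ++ ws], acc.length) := by
  intro ws
  induction ws with
  | nil => intro _ w _ rest acc g; simp
  | cons u us ih =>
    intro hws w hw rest acc g
    have hu : u.2 = c := hws u (by simp)
    rw [show ((w :: ((u :: us) ++ rest)).zip ((u :: us) ++ rest))
        = (w, u) :: ((u :: (us ++ rest)).zip (us ++ rest)) from rfl, pvRunF_cons]
    have hstep : pvF (acc ++ [g], acc.length) w u = (acc ++ [g ++ [u]], acc.length) := by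
      simp only [pvF, hu, hw]
      simp [pv_modify_last]
    rw [hstep, ih (fun p hp => hws p (by simp [hp])) u hu rest acc (g ++ [u])]
    have hgl : (u :: us).getLastD w = us.getLastD u := by
      cases us <;> simp [List.getLastD]
    rw [hgl]
    simp [List.append_assoc]

theorem pv_runR :
    ∀ (D : List Int) (f : Int → List (String × Int)),
    D.Pairwise (· > ·) → (∀ c ∈ D, f c ≠ []) → (∀ c ∈ D, ∀ p ∈ f c, p.2 = c) →
    ∀ (v : String × Int), (∀ c, D.head? = some c → v.2 ≠ c) →
    ∀ (acc : List (List (String × Int))) (g : List (String × Int)),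
    pvRunF ((v :: D.flatMap f).zip (D.flatMap f)) (acc ++ [g], acc.length)
    = (acc ++ g :: D.map f, acc.length + D.length) := by
  intro D
  induction D with
  | nil => intro f _ _ _ v _ acc g; simp [pvRunF]
  | cons c D' ih =>
    intro f hD hne hkey v hv acc g
    obtain ⟨w, ws, hfc⟩ : ∃ w ws, f c = w :: ws := by
      cases hfc' : f c with
      | nil => exact absurd hfc' (hne c (by simp))
      | cons w ws => exact ⟨w, ws, rfl⟩
    have hw : w.2 = c := hkey c (by simp) w (by simp [hfc])
    have hws : ∀ p ∈ ws, p.2 = c := fun p hp => hkey c (by simp) p (by simp [hfc, hp])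
    have hflat : (c :: D').flatMap f = w :: (ws ++ D'.flatMap f) := by simp [hfc]
    rw [hflat]
    rw [show ((v :: (w :: (ws ++ D'.flatMap f))).zip (w :: (ws ++ D'.flatMap f)))
        = (v, w) :: ((w :: (ws ++ D'.flatMap f)).zip (ws ++ D'.flatMap f)) from rfl, pvRunF_cons]
    have hstep : pvF (acc ++ [g], acc.length) v w = ((acc ++ [g]) ++ [[w]], (acc ++ [g]).length) := by
      have hne2 : w.2 ≠ v.2 := by
        rw [hw]; exact fun e => hv c rfl e.symm
      simp only [pvF, if_neg hne2]
      simp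
    rw [hstep, pv_inner c ws hws w hw (D'.flatMap f) (acc ++ [g]) [w]]
    have hlast : (ws.getLastD w).2 = c := by
      have hmem : ws.getLastD w ∈ w :: ws := List.getLastD_mem_cons
      rcases List.mem_cons.mp hmem with h | h
      · rw [h]; exact hw
      · exact hws _ h
    have hv' : ∀ c', D'.head? = some c' → (ws.getLastD w).2 ≠ c' := by
      intro c' hc'
      have hcD' : c' ∈ D' := by
        cases D' with
        | nil => simp at hc'
        | cons x t => simp at hc'; simp [hc']
      have : c > c' := (List.pairwise_cons.mp hD).1 c' hcD'
      rw [hlast]; omega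
    rw [ih f (List.pairwise_cons.mp hD).2 (fun d hd => hne d (by simp [hd]))
        (fun d hd => hkey d (by simp [hd])) (ws.getLastD w) hv' (acc ++ [g]) ([w] ++ ws)]
    have hfc2 : [w] ++ ws = f c := by simp [hfc]
    rw [hfc2]
    simp [List.append_assoc]
    omega

theorem pv_groupLoop_eq (D : List Int) (f : Int → List (String × Int))
    (hD : D.Pairwise (· > ·)) (hne : ∀ c ∈ D, f c ≠ []) (hkey : ∀ c ∈ D, ∀ p ∈ f c, p.2 = c)
    (hlen : (D.flatMap f).length = 26) :
    pvGroupLoopA (D.flatMap f) = D.map f := by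
  obtain ⟨c, D', rfl⟩ : ∃ c D', D = c :: D' := by
    cases D with
    | nil => simp at hlen
    | cons c D' => exact ⟨c, D', rfl⟩
  obtain ⟨w, ws, hfc⟩ : ∃ w ws, f c = w :: ws := by
    cases hfc' : f c with
    | nil => exact absurd hfc' (hne c (by simp))
    | cons w ws => exact ⟨w, ws, rfl⟩
  have hw : w.2 = c := hkey c (by simp) w (by simp [hfc])
  have hws : ∀ p ∈ ws, p.2 = c := fun p hp => hkey c (by simp) p (by simp [hfc, hp])
  have hflat : (c :: D').flatMap f = w :: (ws ++ D'.flatMap f) := by simp [hfc]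
  have hbridge : pvGroupLoopA ((c :: D').flatMap f)
      = (pvRunF (((c :: D').flatMap f).zip ((c :: D').flatMap f).tail)
          ([[PySem.List.pyGetD ((c :: D').flatMap f) 0 ("", 0)]], 0)).1 := by
    unfold pvGroupLoopA pvRunF
    exact congrArg Prod.fst (pv_loop_eq_pairs _ hlen pvF _)
  rw [hbridge, hflat]
  rw [PySem.List.pyGetD_zero_cons]
  have hinit : ([[w]], (0 : Nat)) = (([] : List (List (String × Int))) ++ [[w]],
      List.length ([] : List (List (String × Int)))) := by simp
  rw [List.tail_cons, hinit, pv_inner c ws hws w hw (D'.flatMap f) [] [w]]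
  have hlast : (ws.getLastD w).2 = c := by
    have hmem : ws.getLastD w ∈ w :: ws := List.getLastD_mem_cons
    rcases List.mem_cons.mp hmem with h | h
    · rw [h]; exact hw
    · exact hws _ h
  have hv' : ∀ c', D'.head? = some c' → (ws.getLastD w).2 ≠ c' := by
    intro c' hc'
    have hcD' : c' ∈ D' := by
      cases D' with
      | nil => simp at hc'
      | cons x t => simp at hc'; simp [hc']
    have : c > c' := (List.pairwise_cons.mp hD).1 c' hcD'
    rw [hlast]; omega
  rw [pv_runR D' f (List.pairwise_cons.mp hD).2 (fun d hd => hne d (by simp [hd]))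
      (fun d hd => hkey d (by simp [hd])) (ws.getLastD w) hv' [] ([w] ++ ws)]
  simp [hfc]

-- ---- A's stable descending sort is the concatenation of the count buckets ----
theorem pv_flatMap_congr {α β : Type} (l : List α) (f g : α → List β)
    (h : ∀ a ∈ l, f a = g a) : l.flatMap f = l.flatMap g := by
  induction l with
  | nil => rfl
  | cons a t ih =>
    rw [List.flatMap_cons, List.flatMap_cons, h a (by simp), ih (fun a ha => h a (by simp [ha]))]

theorem pv_insertBy_cons {α : Type} (before : α → α → Bool) (x y : α) (ys : List α) :
    PySem.List.insertBy before x (y :: ys)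
    = if before x y then x :: y :: ys else y :: PySem.List.insertBy before x ys := rfl

theorem pv_insertBy_skip {α : Type} (before : α → α → Bool) (x : α) :
    ∀ (blk rest : List α), (∀ y ∈ blk, before x y = false) →
    PySem.List.insertBy before x (blk ++ rest) = blk ++ PySem.List.insertBy before x rest := by
  intro blk
  induction blk with
  | nil => intro rest _; rfl
  | cons b t ih =>
    intro rest h
    rw [List.cons_append, pv_insertBy_cons, h b (by simp)]
    simp only [Bool.false_eq_true, if_false, List.cons_append]
    rw [ih rest (fun y hy => h y (by simp [hy]))]

theorem pv_sorted_snoc {α κ : Type} [LinearOrder κ] (l : List α) (x : α) (key : α → κ) :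
    PySem.List.sorted (l ++ [x]) key true
    = PySem.List.insertBy (fun a b => decide (key b < key a)) x (PySem.List.sorted l key true) := by
  rw [PySem.List.sorted_rev_eq_foldl_insertBy, PySem.List.sorted_rev_eq_foldl_insertBy,
    List.foldl_append]
  rfl

theorem pv_sorted_snoc_P (l : List (String × Int)) (x : String × Int) :
    PySem.List.sorted (l ++ [x]) (fun p => p.2) true
    = PySem.List.insertBy pvBF x (PySem.List.sorted l (fun p => p.2) true) :=
  pv_sorted_snoc l x (fun p => p.2)

theorem pv_sorted_snoc_I (l : List Int) (k : Int) :
    PySem.List.sorted (l ++ [k]) (fun c => c) true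
    = PySem.List.insertBy (fun a b => decide (b < a)) k (PySem.List.sorted l (fun c => c) true) :=
  pv_sorted_snoc l k (fun c => c)

theorem pv_ofList_snoc {α : Type} [BEq α] (l : List α) (k : α) :
    PySem.Set.ofList (l ++ [k]) = PySem.Set.add (PySem.Set.ofList l) k := by
  unfold PySem.Set.ofList
  rw [List.foldl_append]
  rfl

theorem pv_Dgt (ps : List (String × Int)) : (pvD ps).Pairwise (· > ·) := by
  have h1 : (pvD ps).Pairwise (fun a b => b ≤ a) := PySem.List.sorted_pairwise_rev _ _
  have h2 : (pvD ps).Nodup :=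
    ((PySem.List.sorted_perm _ _ _).nodup_iff).mpr (PySem.Set.nodup_ofList _)
  exact (h1.and h2).imp (fun h => lt_of_le_of_ne h.1 (Ne.symm h.2))

theorem pv_D_mem (ps : List (String × Int)) (c : Int) :
    c ∈ pvD ps ↔ c ∈ ps.map (fun p => p.2) := by
  unfold pvD
  rw [PySem.List.mem_sorted, PySem.Set.mem_ofList]

theorem pv_fil_ne (ps : List (String × Int)) (c : Int) (h : c ∈ pvD ps) : pvFil ps c ≠ [] := by
  rw [pv_D_mem] at h
  obtain ⟨p, hp, hpc⟩ := List.mem_map.mp h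
  exact List.ne_nil_of_mem (List.mem_filter.mpr ⟨hp, by simp [hpc]⟩)

theorem pv_fil_key (ps : List (String × Int)) (c : Int) :
    ∀ p ∈ pvFil ps c, p.2 = c := by
  intro p hp
  simpa using (List.mem_filter.mp hp).2

theorem pv_insert_mem :
    ∀ (D : List Int) (f : Int → List (String × Int)), D.Pairwise (· > ·) →
    (∀ c ∈ D, f c ≠ []) → (∀ c ∈ D, ∀ p ∈ f c, p.2 = c) →
    ∀ (x : String × Int), x.2 ∈ D →
    PySem.List.insertBy pvBF x (D.flatMap f)
    = D.flatMap (fun c => f c ++ if c == x.2 then [x] else []) := by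
  intro D
  induction D with
  | nil => intro f _ _ _ x hx; simp at hx
  | cons c D' ih =>
    intro f hD hne hkey x hx
    rw [List.flatMap_cons, List.flatMap_cons]
    rcases List.mem_cons.mp hx with hcx | hx'
    · have hskip : ∀ y ∈ f c, pvBF x y = false := by
        intro y hy
        have hy2 : y.2 = c := hkey c (by simp) y hy
        simp [pvBF, hy2, ← hcx]
      rw [pv_insertBy_skip pvBF x (f c) _ hskip]
      have hrest : PySem.List.insertBy pvBF x (D'.flatMap f) = x :: D'.flatMap f := by
        cases D' with
        | nil => rfl
        | cons c' D'' =>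
          obtain ⟨w, ws, hfc'⟩ : ∃ w ws, f c' = w :: ws := by
            cases hh : f c' with
            | nil => exact absurd hh (hne c' (by simp))
            | cons w ws => exact ⟨w, ws, rfl⟩
          have hw : w.2 = c' := hkey c' (by simp) w (by simp [hfc'])
          have hlt : c' < c := (List.pairwise_cons.mp hD).1 c' (by simp)
          rw [List.flatMap_cons, hfc', List.cons_append, pv_insertBy_cons]
          have hb : pvBF x w = true := by simp [pvBF, hw, ← hcx]; omega
          rw [hb]
          simp [hfc']
      rw [hrest]
      have h1 : (if c == x.2 then [x] else ([] : List (String × Int))) = [x] := by simp [hcx]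
      rw [h1]
      have h2 : D'.flatMap (fun c' => f c' ++ if c' == x.2 then [x] else []) = D'.flatMap f := by
        apply pv_flatMap_congr
        intro a ha
        have hlt : c > a := (List.pairwise_cons.mp hD).1 a ha
        have hne' : (a == x.2) = false := by simp [← hcx]; omega
        rw [hne']
        simp
      rw [h2]
      simp
    · have hgt : c > x.2 := (List.pairwise_cons.mp hD).1 _ hx'
      have hskip : ∀ y ∈ f c, pvBF x y = false := by
        intro y hy
        have hy2 : y.2 = c := hkey c (by simp) y hy
        simp [pvBF, hy2]
        omega
      rw [pv_insertBy_skip pvBF x (f c) _ hskip,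
        ih f (List.pairwise_cons.mp hD).2 (fun d hd => hne d (by simp [hd]))
          (fun d hd => hkey d (by simp [hd])) x hx']
      have h1 : (if c == x.2 then [x] else ([] : List (String × Int))) = [] := by
        simp; omega
      rw [h1]
      simp

theorem pv_insert_notmem :
    ∀ (D : List Int) (f : Int → List (String × Int)), D.Pairwise (· > ·) →
    (∀ c ∈ D, f c ≠ []) → (∀ c ∈ D, ∀ p ∈ f c, p.2 = c) →
    ∀ (x : String × Int), x.2 ∉ D →
    PySem.List.insertBy pvBF x (D.flatMap f)
    = (PySem.List.insertBy (fun a b => decide (b < a)) x.2 D).flatMap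
        (fun c => if c == x.2 then [x] else f c) := by
  intro D
  induction D with
  | nil => intro f _ _ _ x _; simp [PySem.List.insertBy]
  | cons c D' ih =>
    intro f hD hne hkey x hx
    have hcx : c ≠ x.2 := fun e => hx (by simp [e])
    rcases lt_or_gt_of_ne hcx with hlt | hgt
    · obtain ⟨w, ws, hfc⟩ : ∃ w ws, f c = w :: ws := by
        cases hh : f c with
        | nil => exact absurd hh (hne c (by simp))
        | cons w ws => exact ⟨w, ws, rfl⟩
      have hw : w.2 = c := hkey c (by simp) w (by simp [hfc])
      rw [List.flatMap_cons, hfc, List.cons_append, pv_insertBy_cons]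
      have hb : pvBF x w = true := by simp [pvBF, hw]; omega
      rw [hb]
      rw [pv_insertBy_cons]
      have hb2 : decide ((c : Int) < x.2) = true := by simpa using hlt
      rw [hb2]
      simp only [if_true]
      rw [List.flatMap_cons, List.flatMap_cons]
      have h1 : (if x.2 == x.2 then [x] else f x.2) = [x] := by simp
      have h2 : (if c == x.2 then [x] else f c) = f c := by simp [hcx]
      rw [h1, h2, hfc]
      have h3 : D'.flatMap (fun c' => if c' == x.2 then [x] else f c') = D'.flatMap f := by
        apply pv_flatMap_congr
        intro a ha
        have hgt2 : c > a := (List.pairwise_cons.mp hD).1 a ha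
        have hne2 : (a == x.2) = false := by simp; omega
        rw [hne2]
        simp
      rw [h3]
      simp
    · have hskip : ∀ y ∈ f c, pvBF x y = false := by
        intro y hy
        have hy2 : y.2 = c := hkey c (by simp) y hy
        simp [pvBF, hy2]
        omega
      rw [List.flatMap_cons, pv_insertBy_skip pvBF x (f c) _ hskip,
        ih f (List.pairwise_cons.mp hD).2 (fun d hd => hne d (by simp [hd]))
          (fun d hd => hkey d (by simp [hd])) x (fun h => hx (by simp [h]))]
      rw [pv_insertBy_cons]
      have hb : decide ((c : Int) < x.2) = false := by simp; omega
      rw [hb]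
      simp only [Bool.false_eq_true, if_false]
      rw [List.flatMap_cons]
      have h2 : (if c == x.2 then [x] else f c) = f c := by simp [hcx]
      rw [h2]

theorem pv_S (ps : List (String × Int)) :
    PySem.List.sorted ps (fun p => p.2) true = (pvD ps).flatMap (pvFil ps) := by
  induction ps using List.reverseRecOn with
  | nil => rfl
  | append_singleton pre x ih =>
    rw [pv_sorted_snoc_P pre x, ih]
    have hmap : (pre ++ [x]).map (fun p => p.2) = pre.map (fun p => p.2) ++ [x.2] := by simp
    have hfil : ∀ c, pvFil (pre ++ [x]) c = pvFil pre c ++ if x.2 == c then [x] else [] := by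
      intro c
      unfold pvFil
      rw [List.filter_append, List.filter_singleton]
      cases h : x.2 == c <;> simp [h]
    by_cases hx : x.2 ∈ pre.map (fun p => p.2)
    · have hD : pvD (pre ++ [x]) = pvD pre := by
        unfold pvD
        rw [hmap, pv_ofList_snoc]
        have hadd : PySem.Set.add (PySem.Set.ofList (pre.map (fun p => p.2))) x.2
            = PySem.Set.ofList (pre.map (fun p => p.2)) := by
          unfold PySem.Set.add
          have hc : (PySem.Set.ofList (pre.map (fun p => p.2))).contains x.2 = true := by
            have := (PySem.Set.mem_ofList (pre.map (fun p => p.2)) x.2).mpr hx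
            simpa using this
          rw [hc]
          simp
        rw [hadd]
      rw [hD]
      have hxd : x.2 ∈ pvD pre := (pv_D_mem pre x.2).mpr hx
      rw [pv_insert_mem (pvD pre) (pvFil pre) (pv_Dgt pre) (pv_fil_ne pre)
        (fun c _ => pv_fil_key pre c) x hxd]
      apply pv_flatMap_congr
      intro c hc
      rw [hfil c]
      congr 1
      by_cases h : c = x.2
      · subst h; simp
      · have h1 : (c == x.2) = false := by simp [h]
        have h2 : (x.2 == c) = false := by simp; exact fun e => h e.symm
        rw [h1, h2]
    · have hD : pvD (pre ++ [x]) = PySem.List.insertBy (fun a b => decide (b < a)) x.2 (pvD pre) := by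
        unfold pvD
        rw [hmap, pv_ofList_snoc]
        have hadd : PySem.Set.add (PySem.Set.ofList (pre.map (fun p => p.2))) x.2
            = PySem.Set.ofList (pre.map (fun p => p.2)) ++ [x.2] := by
          unfold PySem.Set.add
          have hc : (PySem.Set.ofList (pre.map (fun p => p.2))).contains x.2 = false := by
            by_contra h
            have hmem := (PySem.Set.mem_ofList (pre.map (fun p => p.2)) x.2).mp
            simp at h
            exact hx (hmem (by simpa using h))
          rw [hc]
          simp
        rw [hadd, pv_sorted_snoc_I]
      rw [hD]
      have hxd : x.2 ∉ pvD pre := fun h => hx ((pv_D_mem pre x.2).mp h)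
      rw [pv_insert_notmem (pvD pre) (pvFil pre) (pv_Dgt pre) (pv_fil_ne pre)
        (fun c _ => pv_fil_key pre c) x hxd]
      apply pv_flatMap_congr
      intro c hc
      rw [hfil c]
      by_cases hcx : c = x.2
      · have hfilnil : pvFil pre c = [] := by
          unfold pvFil
          rw [List.filter_eq_nil_iff]
          intro p hp
          simp
          intro e
          exact hx (List.mem_map.mpr ⟨p, hp, e.trans hcx⟩)
        rw [← hcx] at *
        simp [hfilnil]
      · have h1 : (c == x.2) = false := by simp [hcx]
        have h2 : (x.2 == c) = false := by simp; exact fun e => hcx e.symm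
        rw [h1, h2]
        simp

-- ---- B's bucket dict, computed ----
theorem pv_buckets_getD (ps : List (String × Int)) (c : Int) :
    (pvBucketsB ps).getD c [] = pvFil ps c := by
  unfold pvBucketsB pvFil
  have h : ps.foldl (fun b p => b.modify p.2 [] (· ++ [p])) PySem.Dict.empty
      = (ps.map (fun p => (p.2, p))).foldl (fun d q => d.modify q.1 [] (· ++ [q.2]))
          PySem.Dict.empty := by
    rw [List.foldl_map]
  rw [h, PySem.Dict.getD_foldl_modify_append]
  simp [List.filter_map, Function.comp_def]

theorem pv_buckets_keys (ps : List (String × Int)) :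
    (pvBucketsB ps).keys = PySem.Set.ofList (ps.map (fun p => p.2)) := by
  have h2 : (ps.foldl (fun b p => b.modify p.2 [] (· ++ [p])) PySem.Dict.empty).keys
      = PySem.Set.update PySem.Dict.empty.keys (ps.map (fun p => p.2)) :=
    PySem.Dict.keys_foldl_modify_key ps (fun p => p.2) [] (fun _ p => (· ++ [p])) PySem.Dict.empty
  unfold pvBucketsB
  rw [h2]
  rfl

-- ---- the frequency dict has exactly the 26 letter keys under Pre_ ----
theorem pv_init_keys : pvInitA.keys = (PySem.List.pyRange 97 123 1).map pvChrA := by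
  decide

theorem pv_update_subset {α : Type} [BEq α] [LawfulBEq α] :
    ∀ (l : List α) (s : PySem.Set α), (∀ x ∈ l, x ∈ s) → PySem.Set.update s l = s := by
  intro l
  induction l with
  | nil => intro s _; rfl
  | cons a t ih =>
    intro s h
    have hadd : PySem.Set.add s a = s := by
      unfold PySem.Set.add
      have hc : s.contains a = true := by
        simpa using h a (by simp)
      rw [hc]
      simp
    have : PySem.Set.update s (a :: t) = PySem.Set.update (PySem.Set.add s a) t := rfl
    rw [this, hadd, ih s (fun x hx => h x (by simp [hx]))]

theorem pv_mem_init_keys (c : Char) (h1 : 97 ≤ c.toNat) (h2 : c.toNat ≤ 122) :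
    String.singleton c ∈ pvInitA.keys := by
  rw [pv_init_keys]
  refine List.mem_map.mpr ⟨(c.toNat : Int), ?_, ?_⟩
  · rw [PySem.List.mem_pyRange_one]
    omega
  · unfold pvChrA
    rw [Int.toNat_natCast, Char.ofNat_toNat]

theorem pv_freq_keys (msg : String) (h : Pre_compte_lettres msg) :
    (pvFreqA msg).keys = pvInitA.keys := by
  unfold pvFreqA
  have h2 : ((msg.toList.map (fun c => String.singleton c)).foldl
      (fun d lettre => d.modify lettre 0 (· + 1)) pvInitA).keys
      = PySem.Set.update pvInitA.keys ((msg.toList.map (fun c => String.singleton c)).map id) :=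
    PySem.Dict.keys_foldl_modify_key _ id 0 (fun _ _ => (· + 1)) pvInitA
  rw [h2, List.map_id]
  apply pv_update_subset
  intro x hx
  obtain ⟨c, hc, rfl⟩ := List.mem_map.mp hx
  unfold Pre_compte_lettres at h
  rw [List.all_eq_true] at h
  have := h c hc
  simp at this
  exact pv_mem_init_keys c this.1 this.2

theorem pv_freq_len (msg : String) (h : Pre_compte_lettres msg) :
    (pvFreqA msg).items.length = 26 := by
  have hk : (pvFreqA msg).keys.length = 26 := by
    rw [pv_freq_keys msg h]
    decide
  simpa [PySem.Dict.keys] using hk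

-- ===== VERDICT (by name: the statement is the Claim_ definition above) =====
theorem compte_lettres_spec : Claim_equal_compte_lettres := by
  unfold Claim_equal_compte_lettres
  intro msg _dom hpre
  unfold Spec_compte_lettres compte_lettres compte_lettres_alt
  rw [← pv_freqAB msg]
  have hlen : (pvFreqA msg).items.length = 26 := pv_freq_len msg hpre
  show pvGroupLoopA (PySem.List.sorted (pvFreqA msg).items (fun p => p.2) true)
      = (PySem.List.sorted (pvBucketsB (pvFreqA msg).items).keys (fun c => c) true).map
          (fun c => (pvBucketsB (pvFreqA msg).items).getD c [])
  set ps := (pvFreqA msg).items with hps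
  rw [pv_S ps, pv_buckets_keys ps]
  have hflatlen : ((pvD ps).flatMap (pvFil ps)).length = 26 := by
    rw [← pv_S ps, PySem.List.length_sorted]
    exact hlen
  rw [pv_groupLoop_eq (pvD ps) (pvFil ps) (pv_Dgt ps) (pv_fil_ne ps)
    (fun c _ => pv_fil_key ps c) hflatlen]
  exact List.map_congr_left (fun c hc => (pv_buckets_getD ps c).symm)
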